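-- pv_equiv track=rewrite | github.com/kiyoxi2020/leetcode | code/LCP-08.py | getTriggerTime
-- ===== SOURCE A (Python) =====
-- def getTriggerTime(increase, requirements):
--     """
--     :type increase: List[List[int]]
--     :type requirements: List[List[int]]
--     :rtype: List[int]
--     """
--     st = [0, 0, 0]
--     n = len(requirements)
--     req_c = [[requirements[i][0], i] for i in range(n)]
--     req_r = [[requirements[i][1], i] for i in range(n)]
--     req_h = [[requirements[i][2], i] for i in range(n)]
--     req_c.sort()
--     req_r.sort()
--     req_h.sort()
--     reach = [0]*n
--     sum_c, sum_r, sum_h = 0, 0, 0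
--     i_c, i_r, i_h = 0, 0, 0
--     out = [-1]*n
--     count = 0
--
--     def repeat(req, sum0, i, count):
--         while(i<n and req[i][0]<=sum0):
--             ind = req[i][1]
--             reach[ind] += 1
--             if reach[ind] == 3: out[ind] = count
--             i+=1
--         return i
--     i_c = repeat(req_c, sum_c, i_c, count)
--     i_r = repeat(req_r, sum_r, i_r, count)
--     i_h = repeat(req_h, sum_h, i_h, count)
--     for c, r, h in increase:
--         sum_c, sum_r, sum_h = sum_c+c, sum_r+r, sum_h+h
--         count += 1
--         i_c = repeat(req_c, sum_c, i_c, count)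
--         i_r = repeat(req_r, sum_r, i_r, count)
--         i_h = repeat(req_h, sum_h, i_h, count)
--
--     return out
-- ===== SOURCE B (Python) =====
-- import bisect
--
-- def getTriggerTime(increase, requirements):
--     # Running-max prefix arrays (day 0 = all zero); each is nondecreasing, so a
--     # requirement's first satisfiable day per resource is a binary search.
--     maxes = [[0], [0], [0]]
--     cur = [0, 0, 0]
--     for row in increase:
--         for k in range(3):
--             cur[k] += row[k]
--             maxes[k].append(max(maxes[k][-1], cur[k]))
--     limit = len(increase)
--     out = []
--     for req in requirements:
--         d = max(bisect.bisect_left(maxes[k], req[k]) for k in range(3))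
--         out.append(d if d <= limit else -1)
--     return out
-- ===== Notes on version B (the rewrite author's own statement) =====
-- stated objective: alternative
-- what changed: Replaces A's three sorted pointer lists advanced day by day (with reach counters and in-place out updates) by per-resource running-max prefix arrays and a binary search (bisect_left) per requirement, taking the max of the three first-satisfiable days.
import Mathlib
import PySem

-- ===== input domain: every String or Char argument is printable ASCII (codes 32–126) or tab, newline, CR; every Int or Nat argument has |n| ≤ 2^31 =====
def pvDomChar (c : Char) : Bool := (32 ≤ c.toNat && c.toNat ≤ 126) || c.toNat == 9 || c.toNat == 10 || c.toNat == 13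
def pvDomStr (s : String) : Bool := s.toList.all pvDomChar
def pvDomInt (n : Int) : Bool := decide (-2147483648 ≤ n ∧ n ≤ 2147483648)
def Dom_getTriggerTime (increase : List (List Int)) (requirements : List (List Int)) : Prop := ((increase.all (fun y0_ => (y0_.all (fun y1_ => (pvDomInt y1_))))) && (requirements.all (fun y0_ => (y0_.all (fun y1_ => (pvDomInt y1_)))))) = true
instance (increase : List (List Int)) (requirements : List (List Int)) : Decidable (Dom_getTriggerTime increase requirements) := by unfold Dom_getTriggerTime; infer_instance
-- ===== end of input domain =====

-- B replaces A's three sorted pointer lists with per-resource running-max prefix arrays and a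
-- binary search (bisect_left) per requirement (objective: alternative algorithm of similar cost).


-- ===== PORT A =====
-- A's inner `repeat` while loop: advance pointer i while the sorted list's value is ≤ sum0,
-- bumping reach[ind] and recording out[ind] = count when reach[ind] hits 3.
-- (Python's reach[ind]/out[ind] accesses are always in range; getD/set realise them exactly.)

def repeatA (req : List (Int × Int)) (n : Nat) (sum0 count : Int) (i : Nat)
    (reach out : List Int) : Nat × List Int × List Int :=
  if h : i < n ∧ (req.getD i (0, 0)).1 ≤ sum0 then
    let ind := (req.getD i (0, 0)).2.toNat
    let r := reach.getD ind 0 + 1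
    repeatA req n sum0 count (i + 1) (reach.set ind r)
      (if r = 3 then out.set ind count else out)
  else (i, reach, out)
termination_by n - i
decreasing_by omega

def dayStepA (req_c req_r req_h : List (Int × Int)) (n : Nat)
    (s : (Int × Int × Int) × (Nat × Nat × Nat) × Int × List Int × List Int)
    (row : List Int) : (Int × Int × Int) × (Nat × Nat × Nat) × Int × List Int × List Int :=
  let sc := s.1.1 + row.getD 0 0
  let sr := s.1.2.1 + row.getD 1 0
  let sh := s.1.2.2 + row.getD 2 0
  let count := s.2.2.1 + 1
  let a1 := repeatA req_c n sc count s.2.1.1 s.2.2.2.1 s.2.2.2.2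
  let a2 := repeatA req_r n sr count s.2.1.2.1 a1.2.1 a1.2.2
  let a3 := repeatA req_h n sh count s.2.1.2.2 a2.2.1 a2.2.2
  ((sc, sr, sh), (a1.1, a2.1, a3.1), count, a3.2.1, a3.2.2)

def getTriggerTime (increase : List (List Int)) (requirements : List (List Int)) : List Int :=
  let n := requirements.length
  let req_c := PySem.List.sorted ((List.range n).map (fun i => ((requirements.getD i []).getD 0 0, (i : Int)))) (fun q => q.1) false
  let req_r := PySem.List.sorted ((List.range n).map (fun i => ((requirements.getD i []).getD 1 0, (i : Int)))) (fun q => q.1) false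
  let req_h := PySem.List.sorted ((List.range n).map (fun i => ((requirements.getD i []).getD 2 0, (i : Int)))) (fun q => q.1) false
  let s1 := repeatA req_c n 0 0 0 (List.replicate n 0) (List.replicate n (-1))
  let s2 := repeatA req_r n 0 0 0 s1.2.1 s1.2.2
  let s3 := repeatA req_h n 0 0 0 s2.2.1 s2.2.2
  let fin := increase.foldl (dayStepA req_c req_r req_h n) ((0, 0, 0), (s1.1, s2.1, s3.1), 0, s3.2.1, s3.2.2)
  fin.2.2.2.2

-- ===== PORT B =====
-- running maximum of the prefix sums of xs (cur = current sum, best = max so far)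
def runMax (cur best : Int) : List Int → List Int
  | [] => []
  | x :: xs =>
    let c := cur + x
    let b := max best c
    b :: runMax c b xs

def getTriggerTime_alt (increase : List (List Int)) (requirements : List (List Int)) : List Int :=
  let mc := 0 :: runMax 0 0 (increase.map (fun row => row.getD 0 0))
  let mr := 0 :: runMax 0 0 (increase.map (fun row => row.getD 1 0))
  let mh := 0 :: runMax 0 0 (increase.map (fun row => row.getD 2 0))
  let limit := increase.length
  requirements.map (fun req =>
    let d := max (max (PySem.List.bisectLeft mc (req.getD 0 0)) (PySem.List.bisectLeft mr (req.getD 1 0)))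
      (PySem.List.bisectLeft mh (req.getD 2 0))
    if d ≤ limit then (d : Int) else -1)


-- ===== PRECONDITION & SPEC =====
-- Pre_: Python A unpacks each increase row as `c, r, h` (ValueError unless length exactly 3)
-- and reads requirements[i][2] (IndexError unless length ≥ 3); exactly there A returns.
def Pre_getTriggerTime (increase : List (List Int)) (requirements : List (List Int)) : Prop :=
  (∀ row ∈ increase, row.length = 3) ∧ (∀ row ∈ requirements, 3 ≤ row.length)
instance (increase : List (List Int)) (requirements : List (List Int)) : Decidable (Pre_getTriggerTime increase requirements) := by unfold Pre_getTriggerTime; infer_instance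

def pvWitness_getTriggerTime : List (List Int) × List (List Int) :=
  ([[1, 2, 3], [2, 1, 1]], [[0, 0, 0], [2, 3, 3], [9, 1, 1]])

def Spec_getTriggerTime (increase : List (List Int)) (requirements : List (List Int)) (out : List Int) : Prop := out = getTriggerTime_alt increase requirements
instance (increase : List (List Int)) (requirements : List (List Int)) (out : List Int) : Decidable (Spec_getTriggerTime increase requirements out) := by unfold Spec_getTriggerTime; infer_instance

-- ===== CLAIM (what is proved, stated in full; the proofs are below) =====
def Claim_equal_getTriggerTime : Prop := ∀ (increase : List (List Int)) (requirements : List (List Int)), Dom_getTriggerTime increase requirements → Pre_getTriggerTime increase requirements → Spec_getTriggerTime increase requirements (getTriggerTime increase requirements)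

-- ===== LEMMAS AND PROOFS =====

def Ssum (xs : List Int) (t : Nat) : Int := (xs.take t).sum

def Mx (xs : List Int) : Nat → Int
  | 0 => 0
  | t + 1 => max (Mx xs t) (Ssum xs (t + 1))

theorem runMax_length (xs : List Int) : ∀ cur best, (runMax cur best xs).length = xs.length := by
  induction xs with
  | nil => intro _ _; rfl
  | cons x xs ih => intro cur best; simp [runMax, ih]

theorem runMax_pairwise (xs : List Int) : ∀ cur best, (best :: runMax cur best xs).Pairwise (· ≤ ·) := by
  induction xs with
  | nil => intro _ _; simp [runMax]
  | cons x xs ih =>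
    intro cur best
    have h := ih (cur + x) (max best (cur + x))
    simp only [runMax]
    rw [List.pairwise_cons]
    refine ⟨?_, h⟩
    intro a ha
    rcases List.mem_cons.1 ha with h1 | h2
    · omega
    · have := (List.pairwise_cons.1 h).1 a h2
      omega

theorem runMax_getD_succ (xs : List Int) : ∀ (t : Nat) (cur best : Int), t + 1 ≤ xs.length →
    (best :: runMax cur best xs).getD (t + 1) 0
      = max ((best :: runMax cur best xs).getD t 0) (cur + Ssum xs (t + 1)) := by
  induction xs with
  | nil => intro t cur best h; simp at h
  | cons x xs ih =>
    intro t cur best h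
    match t with
    | 0 => simp [runMax, Ssum]
    | t + 1 =>
      have hs : Ssum (x :: xs) (t + 1 + 1) = x + Ssum xs (t + 1) := by
        simp [Ssum, List.take_succ_cons]
      have hih := ih t (cur + x) (max best (cur + x)) (by simpa using h)
      simp only [runMax, List.getD_cons_succ] at hih ⊢
      rw [hih, hs, add_assoc]

def colK (increase : List (List Int)) (k : Nat) : List Int :=
  increase.map (fun row => row.getD k 0)

def MlistK (increase : List (List Int)) (k : Nat) : List Int :=
  0 :: runMax 0 0 (colK increase k)

def fmK (increase : List (List Int)) (k : Nat) (v : Int) : Nat :=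
  PySem.List.bisectLeft (MlistK increase k) v

theorem length_MlistK (increase : List (List Int)) (k : Nat) :
    (MlistK increase k).length = increase.length + 1 := by
  simp [MlistK, runMax_length, colK]

theorem MlistK_pairwise (increase : List (List Int)) (k : Nat) :
    (MlistK increase k).Pairwise (· ≤ ·) := runMax_pairwise _ _ _

theorem MlistK_getD (increase : List (List Int)) (k : Nat) :
    ∀ t, t ≤ increase.length → (MlistK increase k).getD t 0 = Mx (colK increase k) t := by
  intro t
  induction t with
  | zero => intro _; simp [MlistK, Mx]
  | succ t ih =>
    intro h
    have hlen : t + 1 ≤ (colK increase k).length := by simp [colK]; omega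
    have hgs := runMax_getD_succ (colK increase k) t 0 0 hlen
    have ih' := ih (by omega)
    simp only [MlistK] at ih'
    simp only [MlistK, hgs, zero_add, Mx, ih']

theorem fm_le_iff (increase : List (List Int)) (k : Nat) (v : Int) (t : Nat)
    (ht : t ≤ increase.length) :
    fmK increase k v ≤ t ↔ v ≤ Mx (colK increase k) t := by
  have hspec := PySem.List.bisectLeft_spec (MlistK increase k) v (MlistK_pairwise increase k)
  have hlen := length_MlistK increase k
  have htl : t < (MlistK increase k).length := by omega
  have hget : (MlistK increase k)[t]'htl = Mx (colK increase k) t := by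
    rw [← MlistK_getD increase k t ht]
    exact (List.getD_eq_getElem _ _ htl).symm
  constructor
  · intro hle
    have hx := hspec.2.2 t htl hle
    rw [hget] at hx
    exact hx
  · intro hv
    by_contra hgt
    simp only [fmK] at hgt
    have hx := hspec.2.1 t htl (by omega)
    rw [hget] at hx
    omega

theorem tw_sorted (b : Int) : ∀ (L : List (Int × Int)),
    L.Pairwise (fun q q' => q.1 ≤ q'.1) →
    L.takeWhile (fun q => decide (q.1 ≤ b)) = L.filter (fun q => decide (q.1 ≤ b)) := by
  intro L
  induction L with
  | nil => intro _; rfl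
  | cons x L ih =>
    intro hp
    rcases List.pairwise_cons.1 hp with ⟨hx, hL⟩
    by_cases hxb : x.1 ≤ b
    · simp [List.takeWhile_cons, List.filter_cons, hxb, ih hL]
    · simp only [List.takeWhile_cons, List.filter_cons, decide_eq_true_eq]
      rw [if_neg hxb, if_neg hxb]
      symm
      rw [List.filter_eq_nil_iff]
      intro q hq
      simp only [decide_eq_true_eq]
      have := hx q hq
      omega

theorem dropWhile_gt (a : Int) : ∀ (L : List (Int × Int)),
    L.Pairwise (fun q q' => q.1 ≤ q'.1) →
    ∀ q ∈ L.dropWhile (fun q => decide (q.1 ≤ a)), a < q.1 := by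
  intro L
  induction L with
  | nil => intro _ q hq; simp at hq
  | cons x L ih =>
    intro hp
    rcases List.pairwise_cons.1 hp with ⟨hx, hL⟩
    by_cases hxa : x.1 ≤ a
    · simpa [List.dropWhile_cons, hxa] using ih hL
    · simp only [List.dropWhile_cons, decide_eq_true_eq, if_neg hxa]
      intro q hq
      rcases List.mem_cons.1 hq with rfl | hmem
      · omega
      · have := hx q hmem; omega

theorem drop_countP_eq_dropWhile (L : List (Int × Int)) (a : Int)
    (hs : L.Pairwise (fun q q' => q.1 ≤ q'.1)) :
    L.drop (L.countP (fun q => decide (q.1 ≤ a))) = L.dropWhile (fun q => decide (q.1 ≤ a)) := by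
  have htw := tw_sorted a L hs
  have hlen : (L.takeWhile (fun q => decide (q.1 ≤ a))).length = L.countP (fun q => decide (q.1 ≤ a)) := by
    rw [htw, ← List.countP_eq_length_filter]
  rw [← hlen]
  have h : L.drop (L.takeWhile (fun q => decide (q.1 ≤ a))).length
      = ((L.takeWhile (fun q => decide (q.1 ≤ a)) ++ L.dropWhile (fun q => decide (q.1 ≤ a)))).drop
          (L.takeWhile (fun q => decide (q.1 ≤ a))).length := by
    rw [List.takeWhile_append_dropWhile]
  rw [h, List.drop_left]

theorem sortedWindow (L : List (Int × Int)) (a b : Int)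
    (hs : L.Pairwise (fun q q' => q.1 ≤ q'.1)) :
    L.countP (fun q => decide (q.1 ≤ a))
        + ((L.drop (L.countP (fun q => decide (q.1 ≤ a)))).takeWhile (fun q => decide (q.1 ≤ b))).length
      = L.countP (fun q => decide (q.1 ≤ max a b))
    ∧ (∀ q, q ∈ (L.drop (L.countP (fun q => decide (q.1 ≤ a)))).takeWhile (fun q => decide (q.1 ≤ b))
        ↔ q ∈ L ∧ a < q.1 ∧ q.1 ≤ max a b)
    ∧ ((L.drop (L.countP (fun q => decide (q.1 ≤ a)))).takeWhile (fun q => decide (q.1 ≤ b))).Sublist L := by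
  rw [drop_countP_eq_dropWhile L a hs]
  have hD : L.dropWhile (fun q => decide (q.1 ≤ a)) |>.Pairwise (fun q q' => q.1 ≤ q'.1) :=
    List.Pairwise.sublist (List.dropWhile_sublist _) hs
  have hgt := dropWhile_gt a L hs
  have htwD := tw_sorted b _ hD
  have hsubD : (L.dropWhile (fun q => decide (q.1 ≤ a))).Sublist L := List.dropWhile_sublist _
  have hsubE : ((L.dropWhile (fun q => decide (q.1 ≤ a))).takeWhile (fun q => decide (q.1 ≤ b))).Sublist L :=
    (List.takeWhile_sublist _).trans hsubD
  have hmem : ∀ q, q ∈ (L.dropWhile (fun q => decide (q.1 ≤ a))).takeWhile (fun q => decide (q.1 ≤ b))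
      ↔ q ∈ L ∧ a < q.1 ∧ q.1 ≤ max a b := by
    intro q
    rw [htwD, List.mem_filter]
    constructor
    · rintro ⟨hqD, hqb⟩
      simp only [decide_eq_true_eq] at hqb
      exact ⟨hsubD.mem hqD, hgt q hqD, by omega⟩
    · rintro ⟨hqL, hqa, hqm⟩
      have hqb : q.1 ≤ b := by rcases max_cases a b with ⟨h1, h2⟩ | ⟨h1, h2⟩ <;> omega
      refine ⟨?_, by exact decide_eq_true hqb⟩
      -- q ∈ dropWhile: L = takeWhile ++ dropWhile; q not in takeWhile since q.1 > a
      have hsplit := List.takeWhile_append_dropWhile (p := fun q => decide (q.1 ≤ a)) (l := L)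
      rw [← hsplit] at hqL
      rcases List.mem_append.1 hqL with hq1 | hq2
      · rw [tw_sorted a L hs] at hq1
        have := (List.mem_filter.1 hq1).2
        simp only [decide_eq_true_eq] at this
        omega
      · exact hq2
  refine ⟨?_, hmem, (List.takeWhile_sublist _).trans hsubD⟩
  -- counting
  have hsplit := List.takeWhile_append_dropWhile (p := fun q => decide (q.1 ≤ a)) (l := L)
  conv_rhs => rw [← hsplit]
  rw [List.countP_append]
  have h1 : (L.takeWhile (fun q => decide (q.1 ≤ a))).countP (fun q => decide (q.1 ≤ max a b))
      = L.countP (fun q => decide (q.1 ≤ a)) := by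
    rw [tw_sorted a L hs]
    rw [List.countP_eq_length_filter]
    rw [List.countP_eq_length_filter, List.filter_filter]
    congr 1
    apply List.filter_congr
    intro q hq
    by_cases hqa : q.1 ≤ a
    · simp [hqa, le_trans hqa (le_max_left a b)]
    · simp [hqa]
  rw [h1]
  have h2 : (L.dropWhile (fun q => decide (q.1 ≤ a))).countP (fun q => decide (q.1 ≤ max a b))
      = ((L.dropWhile (fun q => decide (q.1 ≤ a))).takeWhile (fun q => decide (q.1 ≤ b))).length := by
    rw [htwD, ← List.countP_eq_length_filter]
    apply List.countP_congr
    intro q hq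
    have hq1 := hgt q hq
    by_cases hqb : q.1 ≤ b
    · have hm : q.1 ≤ max a b := by omega
      simp [hqb, hm]
    · have : ¬ q.1 ≤ max a b := by omega
      simp [hqb, this]
  omega

def bumpStep (count : Int) (st : List Int × List Int) (q : Int × Int) : List Int × List Int :=
  let ind := q.2.toNat
  let r := st.1.getD ind 0 + 1
  (st.1.set ind r, if r = 3 then st.2.set ind count else st.2)

theorem getD_set_self' (l : List Int) (j : Nat) (h : j < l.length) (v : Int) :
    (l.set j v).getD j 0 = v := by
  rw [List.getD_eq_getElem _ _ (by simpa using h)]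
  simp [List.getElem_set_self]

theorem getD_set_ne' (l : List Int) (i j : Nat) (h : i ≠ j) (v : Int) :
    (l.set i v).getD j 0 = l.getD j 0 := by
  simp only [List.getD_eq_getElem?_getD]
  rw [List.getElem?_set_ne h]

theorem repeatA_eq (req : List (Int × Int)) (n : Nat) (hn : req.length = n) (s count : Int) :
    ∀ (d i : Nat) (reach out : List Int), i ≤ n → n - i ≤ d →
    repeatA req n s count i reach out =
      (i + ((req.drop i).takeWhile (fun q => decide (q.1 ≤ s))).length,
       ((req.drop i).takeWhile (fun q => decide (q.1 ≤ s))).foldl (bumpStep count) (reach, out)) := by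
  intro d
  induction d with
  | zero =>
    intro i reach out hi hd
    have hin : i = n := by omega
    rw [repeatA]
    rw [dif_neg (by omega)]
    rw [List.drop_of_length_le (by omega)]
    simp
  | succ d ih =>
    intro i reach out hi hd
    rw [repeatA]
    by_cases h : i < n ∧ (req.getD i (0, 0)).1 ≤ s
    · rw [dif_pos h]
      have hilen : i < req.length := by omega
      have hdrop : req.drop i = req[i] :: req.drop (i + 1) := List.drop_eq_getElem_cons hilen
      have hgd : req.getD i (0, 0) = req[i] := List.getD_eq_getElem _ _ hilen
      rw [hgd, ih (i + 1) _ _ (by omega) (by omega), hdrop, List.takeWhile_cons,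
        if_pos (decide_eq_true (p := (req[i].1 ≤ s)) (hgd ▸ h.2))]
      simp only [List.length_cons, List.foldl_cons, bumpStep, Prod.mk.injEq]
      exact ⟨by omega, trivial⟩
    · rw [dif_neg h]
      rcases Nat.lt_or_ge i n with hlt | hge
      · have hsgt : ¬ (req.getD i (0, 0)).1 ≤ s := fun hc => h ⟨hlt, hc⟩
        have hilen : i < req.length := by omega
        have hdrop : req.drop i = req[i] :: req.drop (i + 1) := List.drop_eq_getElem_cons hilen
        have hgd : req.getD i (0, 0) = req[i] := List.getD_eq_getElem _ _ hilen
        rw [hdrop, List.takeWhile_cons]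
        rw [if_neg (by rw [← hgd]; simpa using hsgt)]
        simp
      · rw [List.drop_of_length_le (by omega)]
        simp

theorem bumpFold (count : Int) : ∀ (E : List (Int × Int)) (reach out : List Int),
    (E.map (fun q => q.2.toNat)).Nodup →
    (∀ q ∈ E, q.2.toNat < reach.length) →
    reach.length = out.length →
    (E.foldl (bumpStep count) (reach, out)).1.length = reach.length
    ∧ (E.foldl (bumpStep count) (reach, out)).2.length = out.length
    ∧ ∀ j : Nat,
      (E.foldl (bumpStep count) (reach, out)).1.getD j 0
        = reach.getD j 0 + (if ∃ q ∈ E, q.2.toNat = j then 1 else 0)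
      ∧ (E.foldl (bumpStep count) (reach, out)).2.getD j 0
        = if (∃ q ∈ E, q.2.toNat = j) ∧ reach.getD j 0 + 1 = 3 then count else out.getD j 0 := by
  intro E
  induction E with
  | nil => intro reach out _ _ _; simp
  | cons q E ih =>
    intro reach out hnd hb hlen
    have hq : q.2.toNat < reach.length := hb q (List.mem_cons_self)
    rw [List.map_cons, List.nodup_cons] at hnd
    obtain ⟨hqn, hnd'⟩ := hnd
    set ind := q.2.toNat with hind
    set r := reach.getD ind 0 + 1 with hr
    have hstep : bumpStep count (reach, out) q
        = (reach.set ind r, if r = 3 then out.set ind count else out) := rfl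
    have hlen1 : (reach.set ind r).length = reach.length := by simp
    have hlen2 : (if r = 3 then out.set ind count else out).length = out.length := by
      split <;> simp
    have hb' : ∀ q' ∈ E, q'.2.toNat < (reach.set ind r).length := by
      intro q' hq'; rw [hlen1]; exact hb q' (List.mem_cons_of_mem _ hq')
    have ihh := ih (reach.set ind r) (if r = 3 then out.set ind count else out)
      hnd' hb' (by rw [hlen1, hlen2]; exact hlen)
    simp only [List.foldl_cons, hstep]
    refine ⟨by rw [ihh.1, hlen1], by rw [ihh.2.1, hlen2], ?_⟩
    intro j
    have hnotE : ¬ ∃ q' ∈ E, q'.2.toNat = ind := by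
      rintro ⟨q', hq', he⟩
      exact hqn (by rw [← he]; exact List.mem_map_of_mem hq')
    by_cases hj : ind = j
    · subst hj
      have hcond : ∃ q' ∈ q :: E, q'.2.toNat = ind := ⟨q, List.mem_cons_self, rfl⟩
      rw [if_pos hcond]
      have hde := (ihh.2.2 ind).1
      have hdo := (ihh.2.2 ind).2
      rw [if_neg hnotE] at hde
      rw [if_neg (fun hc : (∃ q' ∈ E, q'.2.toNat = ind) ∧ (reach.set ind r).getD ind 0 + 1 = 3 => hnotE hc.1)] at hdo
      constructor
      · rw [hde, getD_set_self' _ _ hq]; omega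
      · rw [hdo]
        by_cases h3 : r = 3
        · rw [if_pos h3, if_pos ⟨hcond, by omega⟩]
          exact getD_set_self' _ _ (by omega) _
        · rw [if_neg h3, if_neg (fun hc => h3 (by omega))]
    · have hde := (ihh.2.2 j).1
      have hdo := (ihh.2.2 j).2
      have hset1 : (reach.set ind r).getD j 0 = reach.getD j 0 := getD_set_ne' _ _ _ hj _
      have hset2 : (if r = 3 then out.set ind count else out).getD j 0 = out.getD j 0 := by
        split
        · exact getD_set_ne' _ _ _ hj _
        · rfl
      have hiff : (∃ q' ∈ q :: E, q'.2.toNat = j) ↔ (∃ q' ∈ E, q'.2.toNat = j) := by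
        constructor
        · rintro ⟨q', hq', he⟩
          rcases List.mem_cons.1 hq' with rfl | hmem
          · exact absurd he hj
          · exact ⟨q', hmem, he⟩
        · rintro ⟨q', hq', he⟩; exact ⟨q', List.mem_cons_of_mem _ hq', he⟩
      constructor
      · rw [hde, hset1]
        by_cases hc : ∃ q' ∈ E, q'.2.toNat = j
        · rw [if_pos hc, if_pos (hiff.2 hc)]
        · rw [if_neg hc, if_neg (fun h => hc (hiff.1 h))]
      · rw [hdo, hset1, hset2]
        by_cases hc : (∃ q' ∈ E, q'.2.toNat = j) ∧ reach.getD j 0 + 1 = 3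
        · rw [if_pos hc, if_pos ⟨hiff.2 hc.1, hc.2⟩]
        · rw [if_neg hc, if_neg (fun hh => hc ⟨hiff.1 hh.1, hh.2⟩)]

abbrev Bumped (L : List (Int × Int)) (a b : Int) (j : Nat) : Prop :=
  ∃ q ∈ L, q.2.toNat = j ∧ a < q.1 ∧ q.1 ≤ max a b

theorem coordStep (L : List (Int × Int)) (n : Nat) (hL : L.length = n)
    (hs : L.Pairwise (fun q q' => q.1 ≤ q'.1))
    (hnd : (L.map (fun q => q.2.toNat)).Nodup)
    (hidx : ∀ q ∈ L, q.2.toNat < n)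
    (a b count : Int) (reach out : List Int)
    (hr : reach.length = n) (ho : out.length = n) :
    (repeatA L n b count (L.countP (fun q => decide (q.1 ≤ a))) reach out).1
        = L.countP (fun q => decide (q.1 ≤ max a b))
    ∧ (repeatA L n b count (L.countP (fun q => decide (q.1 ≤ a))) reach out).2.1.length = n
    ∧ (repeatA L n b count (L.countP (fun q => decide (q.1 ≤ a))) reach out).2.2.length = n
    ∧ ∀ j : Nat,
      (repeatA L n b count (L.countP (fun q => decide (q.1 ≤ a))) reach out).2.1.getD j 0
        = reach.getD j 0 + (if Bumped L a b j then 1 else 0)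
      ∧ (repeatA L n b count (L.countP (fun q => decide (q.1 ≤ a))) reach out).2.2.getD j 0
        = if Bumped L a b j ∧ reach.getD j 0 + 1 = 3 then count else out.getD j 0 := by
  have hple : L.countP (fun q => decide (q.1 ≤ a)) ≤ n := by
    rw [← hL]; exact List.countP_le_length
  obtain ⟨hcount, hmem, hsub⟩ := sortedWindow L a b hs
  rw [repeatA_eq L n hL b count n _ reach out hple (by omega)]
  set E := (L.drop (L.countP (fun q => decide (q.1 ≤ a)))).takeWhile (fun q => decide (q.1 ≤ b)) with hE
  have hndE : (E.map (fun q => q.2.toNat)).Nodup := (hsub.map _).nodup hnd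
  have hbE : ∀ q ∈ E, q.2.toNat < reach.length := by
    intro q hq; rw [hr]; exact hidx q (hsub.mem hq)
  obtain ⟨hl1, hl2, hgd⟩ := bumpFold count E reach out hndE hbE (by omega)
  have hbiff : ∀ j, (∃ q ∈ E, q.2.toNat = j) ↔ Bumped L a b j := by
    intro j
    constructor
    · rintro ⟨q, hq, hj⟩
      obtain ⟨hqL, hqa, hqm⟩ := (hmem q).1 hq
      exact ⟨q, hqL, hj, hqa, hqm⟩
    · rintro ⟨q, hqL, hj, hqa, hqm⟩
      exact ⟨q, (hmem q).2 ⟨hqL, hqa, hqm⟩, hj⟩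
  refine ⟨by simpa using hcount, by rw [hl1, hr], by rw [hl2, ho], ?_⟩
  intro j
  obtain ⟨hg1, hg2⟩ := hgd j
  constructor
  · rw [hg1]
    by_cases hc : Bumped L a b j
    · rw [if_pos ((hbiff j).2 hc), if_pos hc]
    · rw [if_neg (fun h => hc ((hbiff j).1 h)), if_neg hc]
  · rw [hg2]
    by_cases hc : Bumped L a b j ∧ reach.getD j 0 + 1 = 3
    · rw [if_pos ⟨(hbiff j).2 hc.1, hc.2⟩, if_pos hc]
    · rw [if_neg (fun h => hc ⟨(hbiff j).1 h.1, h.2⟩), if_neg hc]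

def vK (requirements : List (List Int)) (k i : Nat) : Int :=
  (requirements.getD i []).getD k 0

def pairsK (requirements : List (List Int)) (k : Nat) : List (Int × Int) :=
  (List.range requirements.length).map (fun i => (vK requirements k i, (i : Int)))

def LKs (requirements : List (List Int)) (k : Nat) : List (Int × Int) :=
  PySem.List.sorted (pairsK requirements k) (fun q => q.1) false

theorem LK_perm (requirements : List (List Int)) (k : Nat) :
    (LKs requirements k).Perm (pairsK requirements k) :=
  PySem.List.sorted_perm _ _ _

theorem length_LK (requirements : List (List Int)) (k : Nat) :
    (LKs requirements k).length = requirements.length := by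
  rw [(LK_perm requirements k).length_eq]
  simp [pairsK]

theorem LK_pairwise (requirements : List (List Int)) (k : Nat) :
    (LKs requirements k).Pairwise (fun q q' => q.1 ≤ q'.1) :=
  PySem.List.sorted_pairwise _ _

theorem mem_LK (requirements : List (List Int)) (k : Nat) (q : Int × Int) :
    q ∈ LKs requirements k ↔ ∃ i, i < requirements.length ∧ q = (vK requirements k i, (i : Int)) := by
  rw [(LK_perm requirements k).mem_iff]
  simp only [pairsK, List.mem_map, List.mem_range]
  constructor
  · rintro ⟨i, hi, rfl⟩; exact ⟨i, hi, rfl⟩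
  · rintro ⟨i, hi, rfl⟩; exact ⟨i, hi, rfl⟩

theorem LK_nodup (requirements : List (List Int)) (k : Nat) :
    ((LKs requirements k).map (fun q => q.2.toNat)).Nodup := by
  have hp := (LK_perm requirements k).map (fun q => q.2.toNat)
  rw [hp.nodup_iff]
  simp only [pairsK, List.map_map]
  have : ((fun q : Int × Int => q.2.toNat) ∘ fun i => (vK requirements k i, (i : Int)))
      = fun i : Nat => i := by
    funext i; simp
  rw [this]
  simpa using List.nodup_range

theorem LK_idx_lt (requirements : List (List Int)) (k : Nat) :
    ∀ q ∈ LKs requirements k, q.2.toNat < requirements.length := by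
  intro q hq
  obtain ⟨i, hi, rfl⟩ := (mem_LK requirements k q).1 hq
  simpa using hi

theorem Ssum_succ (increase : List (List Int)) (k t : Nat) (ht : t < increase.length) :
    Ssum (colK increase k) (t + 1)
      = Ssum (colK increase k) t + (increase.getD t []).getD k 0 := by
  have hlt : t < (colK increase k).length := by simpa [colK] using ht
  have := List.sum_take_succ (colK increase k) t hlt
  rw [Ssum, Ssum, this]
  congr 1
  simp only [colK, List.getElem_map]
  rw [List.getD_eq_getElem _ _ ht]

set_option maxHeartbeats 1600000 in
theorem dayArith (f0 f1 f2 t : Nat) (c0 c1 c2 : Int) (o0 : Int)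
    (hc0 : c0 = (if f0 ≤ t then (1 : Int) else 0) + (if f1 ≤ t then 1 else 0) + (if f2 ≤ t then 1 else 0))
    (ho0 : o0 = if max (max f0 f1) f2 ≤ t then ((max (max f0 f1) f2 : Nat) : Int) else -1) :
    ((c0 + (if f0 = t + 1 then (1 : Int) else 0) + (if f1 = t + 1 then 1 else 0) + (if f2 = t + 1 then 1 else 0))
        = (if f0 ≤ t + 1 then (1 : Int) else 0) + (if f1 ≤ t + 1 then 1 else 0) + (if f2 ≤ t + 1 then 1 else 0))
    ∧ ((if f2 = t + 1 ∧ (c0 + (if f0 = t + 1 then (1 : Int) else 0) + (if f1 = t + 1 then 1 else 0)) + 1 = 3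
          then ((t : Int) + 1)
          else if f1 = t + 1 ∧ (c0 + (if f0 = t + 1 then (1 : Int) else 0)) + 1 = 3
          then ((t : Int) + 1)
          else if f0 = t + 1 ∧ c0 + 1 = 3 then ((t : Int) + 1) else o0)
        = if max (max f0 f1) f2 ≤ t + 1 then ((max (max f0 f1) f2 : Nat) : Int) else -1) := by
  subst hc0 ho0
  constructor
  · split_ifs <;> omega
  · split_ifs <;> omega

theorem dayArith0 (f0 f1 f2 : Nat) :
    (((0 : Int) + (if f0 = 0 then (1 : Int) else 0) + (if f1 = 0 then 1 else 0) + (if f2 = 0 then 1 else 0))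
        = (if f0 ≤ 0 then (1 : Int) else 0) + (if f1 ≤ 0 then 1 else 0) + (if f2 ≤ 0 then 1 else 0))
    ∧ ((if f2 = 0 ∧ ((0 : Int) + (if f0 = 0 then (1 : Int) else 0) + (if f1 = 0 then 1 else 0)) + 1 = 3
          then (0 : Int)
          else if f1 = 0 ∧ ((0 : Int) + (if f0 = 0 then (1 : Int) else 0)) + 1 = 3
          then (0 : Int)
          else if f0 = 0 ∧ (0 : Int) + 1 = 3 then (0 : Int) else -1)
        = if max (max f0 f1) f2 ≤ 0 then ((max (max f0 f1) f2 : Nat) : Int) else -1) := by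
  constructor
  · split_ifs <;> omega
  · split_ifs <;> omega

theorem Bumped_iff_step (increase requirements : List (List Int)) (k t j : Nat)
    (hj : j < requirements.length) (ht : t + 1 ≤ increase.length) :
    Bumped (LKs requirements k) (Mx (colK increase k) t) (Ssum (colK increase k) (t + 1)) j
      ↔ fmK increase k (vK requirements k j) = t + 1 := by
  have hmax : max (Mx (colK increase k) t) (Ssum (colK increase k) (t + 1))
      = Mx (colK increase k) (t + 1) := rfl
  have h1 := fm_le_iff increase k (vK requirements k j) t (by omega)
  have h2 := fm_le_iff increase k (vK requirements k j) (t + 1) ht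
  constructor
  · rintro ⟨q, hqL, hjq, hqa, hqm⟩
    obtain ⟨i, hi, rfl⟩ := (mem_LK requirements k q).1 hqL
    have hij : j = i := by simpa using hjq.symm
    subst hij
    rw [hmax] at hqm
    simp only at hqa hqm
    have hnle : ¬ fmK increase k (vK requirements k j) ≤ t := fun h => by
      have := h1.1 h; omega
    have hle := h2.2 hqm
    omega
  · intro hf
    refine ⟨(vK requirements k j, (j : Int)), (mem_LK requirements k _).2 ⟨j, hj, rfl⟩,
      by simp, ?_, ?_⟩
    · by_contra hle
      push_neg at hle
      have := h1.2 (by simpa using hle)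
      omega
    · rw [hmax]
      exact h2.1 (by omega)

theorem vK_bound (requirements : List (List Int))
    (hdom : requirements.all (fun row => row.all (fun x => pvDomInt x)) = true) (k i : Nat) :
    -(2147483648 : Int) ≤ vK requirements k i ∧ vK requirements k i ≤ 2147483648 := by
  unfold vK
  rcases Nat.lt_or_ge i requirements.length with hi | hi
  · rw [List.getD_eq_getElem _ _ hi]
    rcases Nat.lt_or_ge k (requirements[i].length) with hk | hk
    · rw [List.getD_eq_getElem _ _ hk]
      have hrow := (List.all_eq_true.1 hdom) requirements[i] (by
        exact List.getElem_mem hi)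
      have hx := (List.all_eq_true.1 hrow) (requirements[i][k]) (List.getElem_mem hk)
      simp only [pvDomInt, decide_eq_true_eq] at hx
      omega
    · rw [List.getD_eq_default _ _ hk]; omega
  · rw [List.getD_eq_default _ _ hi]
    simp

theorem countP_A0_zero (requirements : List (List Int)) (k : Nat)
    (hdom : requirements.all (fun row => row.all (fun x => pvDomInt x)) = true) :
    (LKs requirements k).countP (fun q => decide (q.1 ≤ -(2147483649 : Int))) = 0 := by
  rw [List.countP_eq_zero]
  intro q hq
  obtain ⟨i, hi, rfl⟩ := (mem_LK requirements k q).1 hq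
  have hb := vK_bound requirements hdom k i
  intro hc
  have : vK requirements k i ≤ -2147483649 := by simpa using hc
  omega

theorem Bumped_iff_zero (increase requirements : List (List Int)) (k j : Nat)
    (hj : j < requirements.length)
    (hdom : requirements.all (fun row => row.all (fun x => pvDomInt x)) = true) :
    Bumped (LKs requirements k) (-(2147483649 : Int)) 0 j
      ↔ fmK increase k (vK requirements k j) = 0 := by
  have hmax : max (-(2147483649 : Int)) 0 = 0 := by decide
  have h0 := fm_le_iff increase k (vK requirements k j) 0 (by omega)
  constructor
  · rintro ⟨q, hqL, hjq, hqa, hqm⟩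
    obtain ⟨i, hi, rfl⟩ := (mem_LK requirements k q).1 hqL
    have hij : j = i := by simpa using hjq.symm
    subst hij
    rw [hmax] at hqm
    simp only at hqm
    have := h0.2 (by simpa [Mx] using hqm)
    omega
  · intro hf
    have hb := vK_bound requirements hdom k j
    have hle := h0.1 (by omega)
    refine ⟨(vK requirements k j, (j : Int)), (mem_LK requirements k _).2 ⟨j, hj, rfl⟩,
      by simp, by simp only; omega, ?_⟩
    rw [hmax]
    simpa [Mx] using hle

def pK (increase requirements : List (List Int)) (k t : Nat) : Nat :=
  (LKs requirements k).countP (fun q => decide (q.1 ≤ Mx (colK increase k) t))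

def cnt3 (increase requirements : List (List Int)) (t i : Nat) : Int :=
  (if fmK increase 0 (vK requirements 0 i) ≤ t then (1 : Int) else 0)
  + (if fmK increase 1 (vK requirements 1 i) ≤ t then 1 else 0)
  + (if fmK increase 2 (vK requirements 2 i) ≤ t then 1 else 0)

def dmaxN (increase requirements : List (List Int)) (i : Nat) : Nat :=
  max (max (fmK increase 0 (vK requirements 0 i)) (fmK increase 1 (vK requirements 1 i)))
    (fmK increase 2 (vK requirements 2 i))

def InvA (increase requirements : List (List Int)) (t : Nat) (reach out : List Int) : Prop :=
  reach.length = requirements.length ∧ out.length = requirements.length ∧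
  ∀ i, i < requirements.length →
    reach.getD i 0 = cnt3 increase requirements t i
    ∧ out.getD i 0 = (if dmaxN increase requirements i ≤ t then ((dmaxN increase requirements i : Nat) : Int) else -1)

theorem getD_replicate_zero (n j : Nat) : (List.replicate n (0 : Int)).getD j 0 = 0 := by
  rcases Nat.lt_or_ge j n with h | h
  · rw [List.getD_eq_getElem _ _ (by simpa using h)]; simp
  · rw [List.getD_eq_default _ _ (by simpa using h)]

theorem getD_replicate_neg (n j : Nat) (h : j < n) : (List.replicate n (-1 : Int)).getD j 0 = -1 := by
  rw [List.getD_eq_getElem _ _ (by simpa using h)]; simp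

theorem initInv (increase requirements : List (List Int))
    (hdom : requirements.all (fun row => row.all (fun x => pvDomInt x)) = true) :
    (repeatA (LKs requirements 0) requirements.length 0 0 0
        (List.replicate requirements.length 0) (List.replicate requirements.length (-1))).1
      = pK increase requirements 0 0
    ∧ ∀ s1r s1o, s1r = (repeatA (LKs requirements 0) requirements.length 0 0 0
        (List.replicate requirements.length 0) (List.replicate requirements.length (-1))).2.1 →
      s1o = (repeatA (LKs requirements 0) requirements.length 0 0 0
        (List.replicate requirements.length 0) (List.replicate requirements.length (-1))).2.2 →
      (repeatA (LKs requirements 1) requirements.length 0 0 0 s1r s1o).1 = pK increase requirements 1 0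
      ∧ ∀ s2r s2o, s2r = (repeatA (LKs requirements 1) requirements.length 0 0 0 s1r s1o).2.1 →
        s2o = (repeatA (LKs requirements 1) requirements.length 0 0 0 s1r s1o).2.2 →
        (repeatA (LKs requirements 2) requirements.length 0 0 0 s2r s2o).1 = pK increase requirements 2 0
        ∧ InvA increase requirements 0
            (repeatA (LKs requirements 2) requirements.length 0 0 0 s2r s2o).2.1
            (repeatA (LKs requirements 2) requirements.length 0 0 0 s2r s2o).2.2 := by
  have hn := fun k => length_LK requirements k
  have hmax0 : ∀ k, (fun q : Int × Int => decide (q.1 ≤ max (-2147483649 : Int) 0))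
      = (fun q : Int × Int => decide (q.1 ≤ Mx (colK increase k) 0)) := by
    intro k
    funext q
    congr 1
  have hcs : ∀ k reach out, reach.length = requirements.length → out.length = requirements.length →
      (repeatA (LKs requirements k) requirements.length 0 0 0 reach out).1 = pK increase requirements k 0
      ∧ (repeatA (LKs requirements k) requirements.length 0 0 0 reach out).2.1.length = requirements.length
      ∧ (repeatA (LKs requirements k) requirements.length 0 0 0 reach out).2.2.length = requirements.length
      ∧ ∀ j : Nat,
        (repeatA (LKs requirements k) requirements.length 0 0 0 reach out).2.1.getD j 0
          = reach.getD j 0 + (if Bumped (LKs requirements k) (-2147483649) 0 j then 1 else 0)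
        ∧ (repeatA (LKs requirements k) requirements.length 0 0 0 reach out).2.2.getD j 0
          = if Bumped (LKs requirements k) (-2147483649) 0 j ∧ reach.getD j 0 + 1 = 3 then 0 else out.getD j 0 := by
    intro k reach out hr ho
    have hc := coordStep (LKs requirements k) requirements.length (hn k)
      (LK_pairwise requirements k) (LK_nodup requirements k) (LK_idx_lt requirements k)
      (-2147483649) 0 0 reach out hr ho
    rw [countP_A0_zero requirements k hdom] at hc
    refine ⟨?_, hc.2.1, hc.2.2.1, hc.2.2.2⟩
    rw [hc.1, pK, hmax0 k]
  obtain ⟨h10, h1l, h1o, h1g⟩ := hcs 0 (List.replicate requirements.length 0) (List.replicate requirements.length (-1)) (by simp) (by simp)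
  refine ⟨h10, ?_⟩
  rintro s1r s1o rfl rfl
  obtain ⟨h20, h2l, h2o, h2g⟩ := hcs 1 _ _ h1l h1o
  refine ⟨h20, ?_⟩
  rintro s2r s2o rfl rfl
  obtain ⟨h30, h3l, h3o, h3g⟩ := hcs 2 _ _ h2l h2o
  refine ⟨h30, h3l, h3o, ?_⟩
  intro j hj
  have b0 := Bumped_iff_zero increase requirements 0 j hj hdom
  have b1 := Bumped_iff_zero increase requirements 1 j hj hdom
  have b2 := Bumped_iff_zero increase requirements 2 j hj hdom
  obtain ⟨hg1r, hg1o⟩ := h1g j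
  obtain ⟨hg2r, hg2o⟩ := h2g j
  obtain ⟨hg3r, hg3o⟩ := h3g j
  rw [getD_replicate_zero] at hg1r hg1o
  rw [getD_replicate_neg _ _ hj] at hg1o
  rw [hg1r] at hg2r hg2o
  rw [hg1o] at hg2o
  rw [hg2r] at hg3r hg3o
  rw [hg2o] at hg3o
  refine ⟨?_, ?_⟩
  · rw [hg3r]
    simp only [b0, b1, b2, cnt3]
    exact (dayArith0 _ _ _).1
  · rw [hg3o]
    simp only [b0, b1, b2, dmaxN]
    exact (dayArith0 _ _ _).2

theorem dayStep_inv (increase requirements : List (List Int))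
    (hdom : requirements.all (fun row => row.all (fun x => pvDomInt x)) = true)
    (t : Nat) (ht : t + 1 ≤ increase.length) (reach out : List Int)
    (hinv : InvA increase requirements t reach out) :
    ∃ reach' out',
      InvA increase requirements (t + 1) reach' out'
      ∧ dayStepA (LKs requirements 0) (LKs requirements 1) (LKs requirements 2) requirements.length
        ((Ssum (colK increase 0) t, Ssum (colK increase 1) t, Ssum (colK increase 2) t),
         (pK increase requirements 0 t, pK increase requirements 1 t, pK increase requirements 2 t),
         (t : Int), reach, out) (increase.getD t [])
      = ((Ssum (colK increase 0) (t + 1), Ssum (colK increase 1) (t + 1), Ssum (colK increase 2) (t + 1)),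
         (pK increase requirements 0 (t + 1), pK increase requirements 1 (t + 1), pK increase requirements 2 (t + 1)),
         ((t + 1 : Nat) : Int), reach', out') := by
  obtain ⟨hrl, hol, hgd⟩ := hinv
  have hn := fun k => length_LK requirements k
  have hS : ∀ k : Nat, Ssum (colK increase k) t + (increase.getD t []).getD k 0
      = Ssum (colK increase k) (t + 1) :=
    fun k => (Ssum_succ increase k t (by omega)).symm
  have hpk : ∀ k, (LKs requirements k).countP
        (fun q => decide (q.1 ≤ max (Mx (colK increase k) t) (Ssum (colK increase k) (t + 1))))
      = pK increase requirements k (t + 1) := by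
    intro k; rfl
  have hcs : ∀ k reach1 out1, reach1.length = requirements.length → out1.length = requirements.length →
      (repeatA (LKs requirements k) requirements.length (Ssum (colK increase k) (t + 1)) ((t : Int) + 1)
          (pK increase requirements k t) reach1 out1).1 = pK increase requirements k (t + 1)
      ∧ (repeatA (LKs requirements k) requirements.length (Ssum (colK increase k) (t + 1)) ((t : Int) + 1)
          (pK increase requirements k t) reach1 out1).2.1.length = requirements.length
      ∧ (repeatA (LKs requirements k) requirements.length (Ssum (colK increase k) (t + 1)) ((t : Int) + 1)
          (pK increase requirements k t) reach1 out1).2.2.length = requirements.length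
      ∧ ∀ j : Nat,
        (repeatA (LKs requirements k) requirements.length (Ssum (colK increase k) (t + 1)) ((t : Int) + 1)
            (pK increase requirements k t) reach1 out1).2.1.getD j 0
          = reach1.getD j 0
            + (if Bumped (LKs requirements k) (Mx (colK increase k) t) (Ssum (colK increase k) (t + 1)) j then 1 else 0)
        ∧ (repeatA (LKs requirements k) requirements.length (Ssum (colK increase k) (t + 1)) ((t : Int) + 1)
            (pK increase requirements k t) reach1 out1).2.2.getD j 0
          = if Bumped (LKs requirements k) (Mx (colK increase k) t) (Ssum (colK increase k) (t + 1)) j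
                ∧ reach1.getD j 0 + 1 = 3
              then ((t : Int) + 1) else out1.getD j 0 := by
    intro k reach1 out1 hr1 ho1
    have hc := coordStep (LKs requirements k) requirements.length (hn k)
      (LK_pairwise requirements k) (LK_nodup requirements k) (LK_idx_lt requirements k)
      (Mx (colK increase k) t) (Ssum (colK increase k) (t + 1)) ((t : Int) + 1) reach1 out1 hr1 ho1
    rw [hpk k] at hc
    exact ⟨hc.1, hc.2.1, hc.2.2.1, hc.2.2.2⟩
  simp only [dayStepA]
  rw [hS 0, hS 1, hS 2]
  obtain ⟨h10, h1l, h1o, h1g⟩ := hcs 0 reach out hrl hol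
  obtain ⟨h20, h2l, h2o, h2g⟩ := hcs 1 _ _ h1l h1o
  obtain ⟨h30, h3l, h3o, h3g⟩ := hcs 2 _ _ h2l h2o
  refine ⟨_, _, ⟨h3l, h3o, ?_⟩, by rw [h10, h20, h30]; push_cast; rfl⟩
  · 
    intro j hj
    obtain ⟨hcj, hoj⟩ := hgd j hj
    have b0 := Bumped_iff_step increase requirements 0 t j hj ht
    have b1 := Bumped_iff_step increase requirements 1 t j hj ht
    have b2 := Bumped_iff_step increase requirements 2 t j hj ht
    obtain ⟨hg1r, hg1o⟩ := h1g j
    obtain ⟨hg2r, hg2o⟩ := h2g j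
    obtain ⟨hg3r, hg3o⟩ := h3g j
    rw [hcj] at hg1r hg1o
    rw [hoj] at hg1o
    rw [hg1r] at hg2r hg2o
    rw [hg1o] at hg2o
    rw [hg2r] at hg3r hg3o
    rw [hg2o] at hg3o
    have hday := dayArith (fmK increase 0 (vK requirements 0 j)) (fmK increase 1 (vK requirements 1 j))
      (fmK increase 2 (vK requirements 2 j)) t
      (cnt3 increase requirements t j) 0 0
      (if dmaxN increase requirements j ≤ t then ((dmaxN increase requirements j : Nat) : Int) else -1)
      (by simp only [cnt3]) (by simp only [dmaxN])
    refine ⟨?_, ?_⟩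
    · rw [hg3r]
      simp only [b0, b1, b2, cnt3]
      simpa only [cnt3] using hday.1
    · rw [hg3o]
      simp only [b0, b1, b2, dmaxN]
      simpa only [dmaxN] using hday.2

theorem loopInv (increase requirements : List (List Int))
    (hdom : requirements.all (fun row => row.all (fun x => pvDomInt x)) = true) :
    ∀ (rest : List (List Int)) (t : Nat) (reach out : List Int),
      rest = increase.drop t → t ≤ increase.length →
      InvA increase requirements t reach out →
      InvA increase requirements increase.length
        ((rest.foldl (dayStepA (LKs requirements 0) (LKs requirements 1) (LKs requirements 2) requirements.length)
          ((Ssum (colK increase 0) t, Ssum (colK increase 1) t, Ssum (colK increase 2) t),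
           (pK increase requirements 0 t, pK increase requirements 1 t, pK increase requirements 2 t),
           (t : Int), reach, out)).2.2.2.1)
        ((rest.foldl (dayStepA (LKs requirements 0) (LKs requirements 1) (LKs requirements 2) requirements.length)
          ((Ssum (colK increase 0) t, Ssum (colK increase 1) t, Ssum (colK increase 2) t),
           (pK increase requirements 0 t, pK increase requirements 1 t, pK increase requirements 2 t),
           (t : Int), reach, out)).2.2.2.2) := by
  intro rest
  induction rest with
  | nil =>
    intro t reach out hdrop htle hinv
    have hlen : (increase.drop t).length = 0 := by rw [← hdrop]; rfl
    rw [List.length_drop] at hlen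
    have htm : t = increase.length := by omega
    subst htm
    simpa using hinv
  | cons row rest ih =>
    intro t reach out hdrop htle hinv
    have hne : increase.drop t ≠ [] := by rw [← hdrop]; simp
    have htlen : t < increase.length := by
      by_contra h
      exact hne (List.drop_of_length_le (by omega))
    have hsplit : increase.drop t = increase[t] :: increase.drop (t + 1) :=
      List.drop_eq_getElem_cons htlen
    rw [hsplit] at hdrop
    have hrow : row = increase[t] := (List.cons_eq_cons.1 hdrop).1
    have hrest : rest = increase.drop (t + 1) := (List.cons_eq_cons.1 hdrop).2
    have hgetD : increase.getD t [] = row := by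
      rw [List.getD_eq_getElem _ _ htlen, ← hrow]
    obtain ⟨reach', out', hinv', heq⟩ :=
      dayStep_inv increase requirements hdom t (by omega) reach out hinv
    simp only [List.foldl_cons]
    rw [← hgetD, heq]
    exact ih (t + 1) reach' out' hrest (by omega) hinv'

def iS1 (requirements : List (List Int)) : Nat × List Int × List Int :=
  repeatA (LKs requirements 0) requirements.length 0 0 0
    (List.replicate requirements.length 0) (List.replicate requirements.length (-1))

def iS2 (requirements : List (List Int)) : Nat × List Int × List Int :=
  repeatA (LKs requirements 1) requirements.length 0 0 0 (iS1 requirements).2.1 (iS1 requirements).2.2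

def iS3 (requirements : List (List Int)) : Nat × List Int × List Int :=
  repeatA (LKs requirements 2) requirements.length 0 0 0 (iS2 requirements).2.1 (iS2 requirements).2.2

theorem Ssum_zero (xs : List Int) : Ssum xs 0 = 0 := rfl

theorem A_characterization (increase requirements : List (List Int))
    (hdom : requirements.all (fun row => row.all (fun x => pvDomInt x)) = true) :
    (getTriggerTime increase requirements).length = requirements.length
    ∧ ∀ i, i < requirements.length →
      (getTriggerTime increase requirements).getD i 0
        = if dmaxN increase requirements i ≤ increase.length
            then ((dmaxN increase requirements i : Nat) : Int) else -1 := by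
  obtain ⟨h10, hnext⟩ := initInv increase requirements hdom
  obtain ⟨h20, hnext2⟩ := hnext _ _ rfl rfl
  obtain ⟨h30, hinv0⟩ := hnext2 _ _ rfl rfl
  have hloop := loopInv increase requirements hdom increase 0
    (iS3 requirements).2.1 (iS3 requirements).2.2 rfl (by omega) (by exact hinv0)
  simp only [Ssum_zero, Nat.cast_zero] at hloop
  rw [show pK increase requirements 0 0 = (iS1 requirements).1 from h10.symm,
      show pK increase requirements 1 0 = (iS2 requirements).1 from h20.symm,
      show pK increase requirements 2 0 = (iS3 requirements).1 from h30.symm] at hloop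
  have hGT : getTriggerTime increase requirements
      = (increase.foldl (dayStepA (LKs requirements 0) (LKs requirements 1) (LKs requirements 2) requirements.length)
          ((0, 0, 0), ((iS1 requirements).1, (iS2 requirements).1, (iS3 requirements).1),
           0, (iS3 requirements).2.1, (iS3 requirements).2.2)).2.2.2.2 := rfl
  rw [hGT]
  exact ⟨hloop.2.1, fun i hi => (hloop.2.2 i hi).2⟩

theorem B_characterization (increase requirements : List (List Int)) :
    (getTriggerTime_alt increase requirements).length = requirements.length
    ∧ ∀ i, i < requirements.length →
      (getTriggerTime_alt increase requirements).getD i 0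
        = if dmaxN increase requirements i ≤ increase.length
            then ((dmaxN increase requirements i : Nat) : Int) else -1 := by
  constructor
  · simp [getTriggerTime_alt]
  · intro i hi
    have hi' : i < (getTriggerTime_alt increase requirements).length := by
      simpa [getTriggerTime_alt] using hi
    rw [List.getD_eq_getElem _ _ hi']
    simp only [getTriggerTime_alt, List.getElem_map]
    have hv : ∀ k : Nat, requirements[i].getD k 0 = vK requirements k i := by
      intro k; rw [vK, List.getD_eq_getElem _ _ hi]
    simp only [hv]
    rfl

theorem final_equal (increase requirements : List (List Int))
    (hdom : requirements.all (fun row => row.all (fun x => pvDomInt x)) = true) :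
    getTriggerTime increase requirements = getTriggerTime_alt increase requirements := by
  obtain ⟨hAl, hAg⟩ := A_characterization increase requirements hdom
  obtain ⟨hBl, hBg⟩ := B_characterization increase requirements
  apply List.ext_getElem (by rw [hAl, hBl])
  intro i h1 h2
  have hi : i < requirements.length := by rw [hAl] at h1; exact h1
  rw [← List.getD_eq_getElem _ _ h1, ← List.getD_eq_getElem _ _ h2]
  rw [hAg i hi, hBg i hi]


-- ===== VERDICT (by name: the statement is the Claim_ definition above) =====
theorem getTriggerTime_spec : Claim_equal_getTriggerTime := by
  intro increase requirements hdom _hpre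
  unfold Spec_getTriggerTime
  have hdomR : requirements.all (fun row => row.all (fun x => pvDomInt x)) = true := by
    unfold Dom_getTriggerTime at hdom
    rw [Bool.and_eq_true] at hdom
    exact hdom.2
  exact final_equal increase requirements hdomR
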